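-- pv_equiv track=rewrite | github.com/stankudrow/ADS | sequences/reverse/reverse.py | reverse_iterative
-- ===== SOURCE A (Python) =====
-- def reverse_iterative(seq):
--     """reverse_iterative
--
--     Parameters
--     ----------
--     seq : with __add__ protocol.
--
--     Returns
--     -------
--     reversed sequence with __add__ protocol.
--     """
--     lind, rind = 0, len(seq) - 1
--     copy_seq = list(seq)  # item assignment supported
--     while rind - lind > 0:
--         copy_seq[lind], copy_seq[rind] = (
--             copy_seq[rind],
--             copy_seq[lind],
--         )
--         lind, rind = lind + 1, rind - 1
--     if isinstance(seq, str):
--         return "".join(copy_seq)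
--     # type consistency, like when performing [::-1]
--     return type(seq)(copy_seq)
-- ===== SOURCE B (Python) =====
-- def reverse_iterative(seq):
--     base = list(seq)
--     result = []
--     i = len(base) - 1
--     while i >= 0:
--         result.append(base[i])
--         i -= 1
--     if isinstance(seq, str):
--         return "".join(result)
--     return type(seq)(result)
-- ===== Notes on version B (the rewrite author's own statement) =====
-- stated objective: simpler
-- what changed: Replaces the two-pointer in-place symmetric swap with a single back-to-front pass that appends elements to a fresh accumulator list.
import Mathlib
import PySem

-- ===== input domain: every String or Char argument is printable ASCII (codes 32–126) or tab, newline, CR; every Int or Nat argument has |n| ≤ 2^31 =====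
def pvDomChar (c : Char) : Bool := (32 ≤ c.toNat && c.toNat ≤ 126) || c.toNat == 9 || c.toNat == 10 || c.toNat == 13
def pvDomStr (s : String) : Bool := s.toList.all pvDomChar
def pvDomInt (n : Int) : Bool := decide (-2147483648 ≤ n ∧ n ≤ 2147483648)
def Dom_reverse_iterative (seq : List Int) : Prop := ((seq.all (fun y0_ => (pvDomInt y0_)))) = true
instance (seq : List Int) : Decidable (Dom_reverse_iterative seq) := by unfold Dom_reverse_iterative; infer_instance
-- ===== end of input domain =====

-- B replaces A's two-pointer in-place swap with a single back-to-front accumulation pass (simpler decomposition, same O(n) cost).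


-- ===== PORT A =====
-- the while loop: swap copy_seq[lind] and copy_seq[rind], move the pointers inward.
-- Indices are always in range during the loop, so getD 0 is exact for Python's copy_seq[i].
def pvSwapLoop (xs : List Int) (l r : Nat) : List Int :=
  if _h : l < r then
    pvSwapLoop ((xs.set l (xs.getD r 0)).set r (xs.getD l 0)) (l + 1) (r - 1)
  else xs
termination_by r - l
decreasing_by omega

-- rind = len(seq) - 1; for empty input rind = -1 and 'rind - lind > 0' is false, matching l < r on Nat.
def reverse_iterative (seq : List Int) : List Int :=
  pvSwapLoop seq 0 (seq.length - 1)

-- ===== PORT B =====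
-- base[i] with 0 ≤ i < len(base), so getD 0 is exact.
def pvAccLoop (base : List Int) (i : Int) (result : List Int) : List Int :=
  if _h : 0 ≤ i then
    pvAccLoop base (i - 1) (result ++ [base.getD i.toNat 0])
  else result
termination_by (i + 1).toNat
decreasing_by omega

def reverse_iterative_alt (seq : List Int) : List Int :=
  pvAccLoop seq ((seq.length : Int) - 1) []

-- ===== PRECONDITION & SPEC =====
def Spec_reverse_iterative (seq : List Int) (out : List Int) : Prop := out = reverse_iterative_alt seq
instance (seq : List Int) (out : List Int) : Decidable (Spec_reverse_iterative seq out) := by unfold Spec_reverse_iterative; infer_instance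

-- ===== CLAIM (what is proved, stated in full; the proofs are below) =====
def Claim_equal_reverse_iterative : Prop := ∀ (seq : List Int), Dom_reverse_iterative seq → Spec_reverse_iterative seq (reverse_iterative seq)

-- ===== LEMMAS AND PROOFS =====

theorem pvSwapLoop_length (xs : List Int) (l r : Nat) :
    (pvSwapLoop xs l r).length = xs.length := by
  induction xs, l, r using pvSwapLoop.induct with
  | case1 xs l r h ih => rw [pvSwapLoop]; simp only [h, dite_true]; rw [ih]; simp
  | case2 xs l r h => rw [pvSwapLoop]; simp [h]

theorem swap_getD (xs : List Int) (l r : Nat) (hl : l < xs.length) (hr : r < xs.length)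
    (k : Nat) :
    ((xs.set l (xs.getD r 0)).set r (xs.getD l 0)).getD k 0 =
      if k = r then xs.getD l 0 else if k = l then xs.getD r 0 else xs.getD k 0 := by
  simp only [List.getD_eq_getElem?_getD]
  by_cases hkr : k = r
  · subst hkr
    rw [List.getElem?_set_self (by simpa using hr), if_pos rfl]
    simp
  · rw [List.getElem?_set_ne (by omega)]
    by_cases hkl : k = l
    · subst hkl
      rw [List.getElem?_set_self hl, if_neg hkr, if_pos rfl]
      simp
    · rw [List.getElem?_set_ne (by omega), if_neg hkr, if_neg hkl]

theorem pvSwapLoop_getD (xs : List Int) (l r : Nat) (hlen : l + r + 1 = xs.length) :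
    ∀ j, (pvSwapLoop xs l r).getD j 0 =
      if l ≤ j ∧ j ≤ r then xs.getD (l + r - j) 0 else xs.getD j 0 := by
  induction xs, l, r using pvSwapLoop.induct with
  | case2 xs l r h =>
    intro j
    rw [pvSwapLoop]; simp only [h, dite_false]
    split_ifs with hj
    · have : l + r - j = j := by omega
      rw [this]
    · rfl
  | case1 xs l r h ih =>
    intro j
    rw [pvSwapLoop]; simp only [h, dite_true]
    have hr : r < xs.length := by omega
    have hl : l < xs.length := by omega
    have hlen' : (l + 1) + (r - 1) + 1 = ((xs.set l (xs.getD r 0)).set r (xs.getD l 0)).length := by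
      simp only [List.length_set]; omega
    rw [ih hlen' j]
    by_cases hin : l + 1 ≤ j ∧ j ≤ r - 1
    · rw [if_pos hin, if_pos (show l ≤ j ∧ j ≤ r by omega)]
      have hkk : (l + 1) + (r - 1) - j = l + r - j := by omega
      rw [hkk, swap_getD xs l r hl hr, if_neg (by omega), if_neg (by omega)]
    · rw [if_neg hin]
      rw [swap_getD xs l r hl hr]
      by_cases hjr : j = r
      · rw [if_pos hjr, if_pos (show l ≤ j ∧ j ≤ r by omega)]
        congr 1; omega
      · by_cases hjl : j = l
        · rw [if_neg hjr, if_pos hjl, if_pos (show l ≤ j ∧ j ≤ r by omega)]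
          congr 1; omega
        · rw [if_neg hjr, if_neg hjl, if_neg (by omega)]

theorem reverse_iterative_eq_reverse (seq : List Int) :
    reverse_iterative seq = seq.reverse := by
  unfold reverse_iterative
  rcases seq with _ | ⟨a, tl⟩
  · rw [pvSwapLoop]; simp
  · set xs := a :: tl with hxs
    have hlen : 0 + (xs.length - 1) + 1 = xs.length := by simp [hxs]
    apply List.ext_getElem
    · simp [pvSwapLoop_length]
    · intro j h1 h2
      have hj : j < xs.length := by simpa [pvSwapLoop_length] using h1
      have := pvSwapLoop_getD xs 0 (xs.length - 1) hlen j
      have hif : (0 ≤ j ∧ j ≤ xs.length - 1) := ⟨Nat.zero_le _, by omega⟩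
      rw [if_pos hif] at this
      have e1 : (pvSwapLoop xs 0 (xs.length - 1))[j] =
          (pvSwapLoop xs 0 (xs.length - 1)).getD j 0 := by
        rw [List.getD_eq_getElem?_getD, List.getElem?_eq_getElem h1]; rfl
      have e2 : xs.reverse[j]'h2 = xs.getD (0 + (xs.length - 1) - j) 0 := by
        rw [List.getElem_reverse]
        rw [List.getD_eq_getElem?_getD, List.getElem?_eq_getElem (by omega)]
        simp only [Option.getD_some]
        congr 1; omega
      rw [e1, this, ← e2]

theorem pvAccLoop_eq (base : List Int) :
    ∀ (n : Nat), n ≤ base.length → ∀ (res : List Int),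
      pvAccLoop base ((n : Int) - 1) res = res ++ (base.take n).reverse := by
  intro n
  induction n with
  | zero => intro _ res; rw [pvAccLoop]; simp
  | succ m ih =>
    intro hn res
    rw [pvAccLoop]
    have h0 : (0 : Int) ≤ (↑(m + 1) : Int) - 1 := by push_cast; omega
    simp only [h0, dite_true]
    have htn : ((↑(m + 1) : Int) - 1).toNat = m := by omega
    have hstep : ((↑(m + 1) : Int) - 1) - 1 = (↑m : Int) - 1 := by push_cast; ring
    rw [htn, hstep, ih (by omega)]
    have hm : m < base.length := by omega
    have htake : base.take (m + 1) = base.take m ++ [base[m]] := by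
      rw [List.take_add_one, List.getElem?_eq_getElem hm]; rfl
    rw [htake, List.reverse_append]
    simp only [List.reverse_cons, List.reverse_nil, List.nil_append, List.append_assoc,
      List.getD_eq_getElem?_getD, List.getElem?_eq_getElem hm, Option.getD_some,
      List.singleton_append]

theorem reverse_iterative_alt_eq_reverse (seq : List Int) :
    reverse_iterative_alt seq = seq.reverse := by
  unfold reverse_iterative_alt
  have := pvAccLoop_eq seq seq.length (le_refl _) []
  simpa using this

-- ===== VERDICT (by name: the statement is the Claim_ definition above) =====
theorem reverse_iterative_spec : Claim_equal_reverse_iterative := by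
  intro seq _
  unfold Spec_reverse_iterative
  rw [reverse_iterative_eq_reverse, reverse_iterative_alt_eq_reverse]
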